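-- pv_equiv track=rewrite | github.com/sugia/leetcode | Maximal Square.py | find
-- ===== SOURCE A (Python) =====
-- def find(h):
--     res = 0
--     stack = []
--     i = 0
--     while i <= len(h):
--         if not stack or (i < len(h) and h[stack[-1]] < h[i]):
--             stack.append(i)
--             i += 1
--         else:
--             top = stack.pop()
--             if stack:
--                 res = max(res, min(h[top], (i - stack[-1] - 1)))
--             else:
--                 res = max(res, min(h[top], i))
--
--     return res
-- ===== SOURCE B (Python) =====
-- def find(h):
--     res = 0
--     n = len(h)
--     for i in range(n):
--         left = i
--         while left - 1 >= 0 and h[left - 1] >= h[i]: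
--             left -= 1
--         right = i
--         while right + 1 < n and h[right + 1] >= h[i]:
--             right += 1
--         res = max(res, min(h[i], right - left + 1))
--     return res
-- ===== Notes on version B (the rewrite author's own statement) =====
-- stated objective: alternative
-- what changed: Replaced the monotonic index stack (pop/push with widths from stack neighbours) by a direct per-bar expansion: for each bar, scan left and right while neighbours are >= its height and take min(height, width); no stack is maintained.
import Mathlib
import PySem

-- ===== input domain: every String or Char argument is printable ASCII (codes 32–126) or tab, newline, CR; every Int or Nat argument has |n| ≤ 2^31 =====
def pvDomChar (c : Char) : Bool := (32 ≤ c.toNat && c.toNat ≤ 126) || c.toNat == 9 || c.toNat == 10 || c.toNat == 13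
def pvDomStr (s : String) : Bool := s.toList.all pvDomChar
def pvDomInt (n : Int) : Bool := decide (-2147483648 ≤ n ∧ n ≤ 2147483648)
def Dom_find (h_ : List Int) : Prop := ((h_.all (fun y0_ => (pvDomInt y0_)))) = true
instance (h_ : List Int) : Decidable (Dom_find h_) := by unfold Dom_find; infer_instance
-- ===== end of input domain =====

-- B replaces A's monotonic index stack by a direct per-bar left/right expansion (no stack,
-- same exact result; B is a plainer alternative, not faster).

-- ===== PORT A =====
-- The Python while-loop, with the stack kept head-first (head = Python's stack[-1]).
-- Every index Python reads (stack entries and i when i < len(h)) is in range, so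
-- `h.getD idx 0` computes exactly Python's `h[idx]` on the reached states.
def findLoop (h : List Int) (res : Int) (stack : List Nat) (i : Nat) : Int :=
  if _hle : i ≤ h.length then
    if stack = [] ∨ (i < h.length ∧ h.getD (stack.headD 0) 0 < h.getD i 0) then
      findLoop h res (i :: stack) (i + 1)
    else
      match stack with
      | [] => res  -- unreachable: when the stack is empty the first branch is taken
      | t :: rest =>
        findLoop h (max res (min (h.getD t 0)
          (match rest with | [] => (i : Int) | p :: _ => (i : Int) - (p : Int) - 1))) rest i
  else res
termination_by 2 * (h.length + 1 - i) + stack.length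
decreasing_by all_goals (simp only [List.length_cons]; omega)

def find (h_ : List Int) : Int := findLoop h_ 0 [] 0

-- ===== PORT B =====
-- B's inner `while` loops: expand `l` leftward / `r` rightward while the neighbour is ≥ h[i].
def altLeft (h : List Int) (hi : Int) (l : Nat) : Nat :=
  if 1 ≤ l ∧ hi ≤ h.getD (l - 1) 0 then altLeft h hi (l - 1) else l
termination_by l

def altRight (h : List Int) (hi : Int) (r : Nat) : Nat :=
  if r + 1 < h.length ∧ hi ≤ h.getD (r + 1) 0 then altRight h hi (r + 1) else r
termination_by h.length - r
decreasing_by omega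

def find_alt (h_ : List Int) : Int :=
  (List.range h_.length).foldl
    (fun res i =>
      max res (min (h_.getD i 0)
        (((altRight h_ (h_.getD i 0) i : Nat) : Int) - ((altLeft h_ (h_.getD i 0) i : Nat) : Int) + 1))) 0

-- ===== PRECONDITION & SPEC =====
def Spec_find (h_ : List Int) (out : Int) : Prop := out = find_alt h_
instance (h_ : List Int) (out : Int) : Decidable (Spec_find h_ out) := by unfold Spec_find; infer_instance

-- ===== CLAIM (what is proved, stated in full; the proofs are below) =====
def Claim_equal_find : Prop := ∀ (h_ : List Int), Dom_find h_ → Spec_find h_ (find h_)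

-- ===== LEMMAS AND PROOFS =====

-- B's per-bar contribution: min(h[i], right - left + 1).
def termOf (h : List Int) (i : Nat) : Int :=
  min (h.getD i 0) (((altRight h (h.getD i 0) i : Nat) : Int) - ((altLeft h (h.getD i 0) i : Nat) : Int) + 1)

-- Python's stack[-1] seen as an Int, with -1 as the sentinel for an empty stack.
def headI (stack : List Nat) : Int := match stack with | [] => -1 | s :: _ => (s : Int)

-- the leftmost index not below Python's stack[-2] (0 for a 1-element stack)
def leftEnd (rest : List Nat) : Nat := match rest with | [] => 0 | p :: _ => p + 1

-- Loop invariant, part 1: consecutive stack entries p (below) < q (above) have h[p] < h[q] and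
-- every bar strictly between them is ≥ h[q]; below the bottom entry every bar is ≥ its height.
def Between (h : List Int) : List Nat → Prop
  | [] => True
  | [s] => ∀ t, t < s → h.getD s 0 ≤ h.getD t 0
  | q :: p :: rest =>
      (p < q ∧ h.getD p 0 < h.getD q 0 ∧ (∀ t, p < t → t < q → h.getD q 0 ≤ h.getD t 0)) ∧
      Between h (p :: rest)

-- Full loop invariant at a loop-head state (stack, i).
def StInv (h : List Int) (stack : List Nat) (i : Nat) : Prop :=
  i ≤ h.length ∧ (∀ s ∈ stack, s < i) ∧ Between h stack ∧
  (∀ t : Nat, headI stack < (t : Int) → t < i →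
     ∃ u : Nat, t < u ∧ u ≤ i ∧ (u = h.length ∨ h.getD u 0 ≤ h.getD t 0)) ∧
  (∀ s t : Nat, stack.head? = some s → s < t → t < i → h.getD s 0 < h.getD t 0)

-- generic foldl-max facts
theorem le_foldl_max_init (f : Nat → Int) (l : List Nat) (a : Int) :
    a ≤ l.foldl (fun r x => max r (f x)) a := by
  induction l generalizing a with
  | nil => simp
  | cons x xs ih => exact le_trans (le_max_left _ _) (ih _)

theorem le_foldl_max_mem (f : Nat → Int) (l : List Nat) (a : Int) (x : Nat) (hx : x ∈ l) :
    f x ≤ l.foldl (fun r x => max r (f x)) a := by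
  induction l generalizing a with
  | nil => simp at hx
  | cons y ys ih =>
    rcases List.mem_cons.1 hx with rfl | hx
    · exact le_trans (le_max_right _ _) (le_foldl_max_init f ys _)
    · exact ih _ hx

theorem foldl_max_le (f : Nat → Int) (l : List Nat) (a X : Int) (ha : a ≤ X)
    (hf : ∀ x ∈ l, f x ≤ X) : l.foldl (fun r x => max r (f x)) a ≤ X := by
  induction l generalizing a with
  | nil => simpa
  | cons y ys ih =>
    exact ih _ (max_le ha (hf y (List.mem_cons_self))) (fun x hx => hf x (List.mem_cons_of_mem _ hx))

-- altLeft / altRight: basic bounds, coverage, boundary, maximality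
theorem altLeft_le (h : List Int) (hi : Int) (l : Nat) : altLeft h hi l ≤ l := by
  fun_induction altLeft with
  | case1 l hc ih => omega
  | case2 l hc => exact le_refl _

theorem altLeft_cover (h : List Int) (hi : Int) (l : Nat) :
    ∀ t, altLeft h hi l ≤ t → t < l → hi ≤ h.getD t 0 := by
  fun_induction altLeft with
  | case1 l hc ih =>
    intro t h1 h2
    by_cases ht : t < l - 1
    · exact ih t h1 ht
    · have : t = l - 1 := by omega
      subst this; exact hc.2
  | case2 l hc => intro t h1 h2; omega

theorem altLeft_boundary (h : List Int) (hi : Int) (l : Nat) :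
    altLeft h hi l = 0 ∨ h.getD (altLeft h hi l - 1) 0 < hi := by
  fun_induction altLeft with
  | case1 l hc ih => exact ih
  | case2 l hc =>
    rcases Decidable.not_and_iff_not_or_not.1 hc with hc | hc
    · left; omega
    · right; exact lt_of_not_ge hc

theorem altLeft_min (h : List Int) (hi : Int) (l a : Nat)
    (hcov : ∀ t, a ≤ t → t < l → hi ≤ h.getD t 0) : altLeft h hi l ≤ a := by
  by_contra hlt
  have hL := altLeft_le h hi l
  rcases altLeft_boundary h hi l with hb | hb
  · omega
  · exact absurd (hcov (altLeft h hi l - 1) (by omega) (by omega)) (not_le.2 hb)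

theorem altRight_ge (h : List Int) (hi : Int) (r : Nat) : r ≤ altRight h hi r := by
  fun_induction altRight with
  | case1 r hc ih => omega
  | case2 r hc => exact le_refl _

theorem altRight_lt_len (h : List Int) (hi : Int) (r : Nat) (hr : r < h.length) :
    altRight h hi r < h.length := by
  fun_induction altRight with
  | case1 r hc ih => exact ih hc.1
  | case2 r hc => exact hr

theorem altRight_cover (h : List Int) (hi : Int) (r : Nat) :
    ∀ t, r < t → t ≤ altRight h hi r → hi ≤ h.getD t 0 := by
  fun_induction altRight with
  | case1 r hc ih =>
    intro t h1 h2
    by_cases ht : r + 1 < t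
    · exact ih t ht h2
    · have : t = r + 1 := by omega
      subst this; exact hc.2
  | case2 r hc =>
    intro t h1 h2; omega

theorem altRight_boundary (h : List Int) (hi : Int) (r : Nat) :
    h.length ≤ altRight h hi r + 1 ∨ h.getD (altRight h hi r + 1) 0 < hi := by
  fun_induction altRight with
  | case1 r hc ih => exact ih
  | case2 r hc =>
    rcases Decidable.not_and_iff_not_or_not.1 hc with hc | hc
    · left; omega
    · right; exact lt_of_not_ge hc

theorem altRight_max (h : List Int) (hi : Int) (r b : Nat) (hb : b < h.length)
    (hcov : ∀ t, r < t → t ≤ b → hi ≤ h.getD t 0) : b ≤ altRight h hi r := by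
  by_contra hlt
  have hR := altRight_ge h hi r
  rcases altRight_boundary h hi r with hbd | hbd
  · omega
  · exact absurd (hcov (altRight h hi r + 1) (by omega) (by omega)) (not_le.2 hbd)

-- The chain argument: the (G) component of StInv forces every bar in the head gap to be ≥ h[i].
theorem gap_chain (h : List Int) (i : Nat) (hin : i < h.length) (lo : Int)
    (G : ∀ t : Nat, lo < (t : Int) → t < i →
       ∃ u : Nat, t < u ∧ u ≤ i ∧ (u = h.length ∨ h.getD u 0 ≤ h.getD t 0)) :
    ∀ t : Nat, lo < (t : Int) → t < i → h.getD i 0 ≤ h.getD t 0 := by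
  suffices H : ∀ d t : Nat, i - t ≤ d → lo < (t : Int) → t < i → h.getD i 0 ≤ h.getD t 0 by
    exact fun t h1 h2 => H (i - t) t le_rfl h1 h2
  intro d
  induction d with
  | zero => intro t hd h1 h2; omega
  | succ d ih =>
    intro t hd h1 h2
    obtain ⟨u, hu1, hu2, hu3⟩ := G t h1 h2
    rcases hu3 with hu3 | hu3
    · omega
    · by_cases hui : u = i
      · subst hui; exact hu3
      · exact le_trans (ih u (by omega) (lt_trans h1 (by exact_mod_cast hu1)) (by omega)) hu3

theorem between_tail (h : List Int) (T : Nat) (rest : List Nat)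
    (hb : Between h (T :: rest)) : Between h rest := by
  cases rest with
  | nil => trivial
  | cons p r => exact hb.2

-- everything from just above the predecessor up to T (exclusive) is ≥ h[T]
theorem between_head (h : List Int) (T : Nat) (rest : List Nat) (hb : Between h (T :: rest)) :
    ∀ t : Nat, headI rest < (t : Int) → t < T → h.getD T 0 ≤ h.getD t 0 := by
  cases rest with
  | nil => exact fun t _ h2 => hb t h2
  | cons p r =>
    intro t h1 h2
    refine hb.1.2.2 t ?_ h2
    simp only [headI] at h1
    exact_mod_cast h1

theorem inv_push (h : List Int) (stack : List Nat) (i : Nat) (inv : StInv h stack i)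
    (hi : i < h.length)
    (hc : stack = [] ∨ h.getD (stack.headD 0) 0 < h.getD i 0) :
    StInv h (i :: stack) (i + 1) := by
  obtain ⟨hlen, hmem, hbet, hG, h5⟩ := inv
  refine ⟨by omega, ?_, ?_, ?_, ?_⟩
  · intro s hs
    rcases List.mem_cons.1 hs with rfl | hs
    · omega
    · exact lt_trans (hmem s hs) (by omega)
  · -- Between (i :: stack)
    cases stack with
    | nil =>
      intro t ht
      exact gap_chain h i hi (-1) hG t (by omega) ht
    | cons s rest =>
      refine ⟨⟨hmem s List.mem_cons_self, by simpa using hc, ?_⟩, hbet⟩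
      intro t h1 h2
      exact gap_chain h i hi (s : Int) hG t (by exact_mod_cast h1) h2
  · intro t h1 h2
    exfalso
    have : (i : Int) < (t : Int) := by simpa [headI] using h1
    omega
  · intro s t hs h1 h2
    simp only [List.head?_cons, Option.some.injEq] at hs
    omega

theorem inv_pop (h : List Int) (T : Nat) (rest : List Nat) (i : Nat)
    (inv : StInv h (T :: rest) i)
    (hc : i = h.length ∨ h.getD i 0 ≤ h.getD T 0) : StInv h rest i := by
  obtain ⟨hlen, hmem, hbet, hG, h5⟩ := inv
  have hTi : T < i := hmem T List.mem_cons_self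
  -- every bar strictly between headI rest and i is ≥ h[T]
  have key : ∀ t : Nat, headI rest < (t : Int) → t < i → h.getD T 0 ≤ h.getD t 0 := by
    intro t h1 h2
    rcases lt_trichotomy t T with ht | rfl | ht
    · exact between_head h T rest hbet t h1 ht
    · exact le_refl _
    · exact le_of_lt (h5 T t rfl ht h2)
  refine ⟨hlen, fun s hs => hmem s (List.mem_cons_of_mem _ hs), between_tail h T rest hbet, ?_, ?_⟩
  · -- (G): u := i works for the whole new gap
    intro t h1 h2
    exact ⟨i, h2, le_rfl, by
      rcases hc with hc | hc
      · exact Or.inl hc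
      · exact Or.inr (le_trans hc (key t h1 h2))⟩
  · intro s t hs h1 h2
    cases rest with
    | nil => simp at hs
    | cons p r =>
      simp only [List.head?_cons, Option.some.injEq] at hs
      have h1' : headI (p :: r) < (t : Int) := by
        simp only [headI, hs]; exact_mod_cast h1
      exact lt_of_lt_of_le (hs ▸ hbet.1.2.1) (key t h1' h2)

-- the width A records at a pop, written with the headI sentinel
theorem width_eq (i : Nat) (rest : List Nat) :
    (match rest with | [] => (i : Int) | p :: _ => (i : Int) - (p : Int) - 1)
      = (i : Int) - 1 - headI rest := by
  cases rest with
  | nil => simp [headI]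
  | cons p r => simp [headI]; ring

theorem grand (h : List Int) (res : Int) (stack : List Nat) (i : Nat) :
    StInv h stack i →
      res ≤ findLoop h res stack i ∧
      (∀ pre j rest, stack = pre ++ j :: rest → ∀ r : Nat, i ≤ r + 1 → r < h.length →
          (∀ t : Nat, i ≤ t → t ≤ r → h.getD j 0 < h.getD t 0) →
          min (h.getD j 0) ((r : Int) - headI rest) ≤ findLoop h res stack i) ∧
      (∀ i0 : Nat, i ≤ i0 → i0 < h.length → termOf h i0 ≤ findLoop h res stack i) := by
  fun_induction findLoop with
  | case1 res stack i hle hc ih =>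
    intro inv
    by_cases hi : i < h.length
    case neg =>
      -- i = h.length: the branch condition forces an empty stack and the next state exits
      have hstack : stack = [] := by
        rcases hc with hc | hc
        · exact hc
        · omega
      subst hstack
      have hstop : findLoop h res (i :: []) (i + 1) = res := by
        rw [findLoop]
        simp [show ¬ (i + 1 ≤ h.length) from by omega]
      rw [hstop]
      refine ⟨le_rfl, ?_, ?_⟩
      · intro pre j rest hdec
        exact absurd hdec (by cases pre <;> simp)
      · intro i0 h1 h2; omega
    case pos =>
      have hc' : stack = [] ∨ h.getD (stack.headD 0) 0 < h.getD i 0 := by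
        rcases hc with hc | hc
        · exact Or.inl hc
        · exact Or.inr hc.2
      obtain ⟨iha, ihb, ihc⟩ := ih (inv_push h stack i inv hi hc')
      refine ⟨iha, ?_, ?_⟩
      · -- (b): future pops of current stack elements
        intro pre j rest2 hdec r h1 h2 h3
        by_cases hr : i ≤ r
        · exact ihb (i :: pre) j rest2 (by simp [hdec]) r (by omega) h2
            (fun t ht1 ht2 => h3 t (by omega) ht2)
        · have hb := ihb (i :: pre) j rest2 (by simp [hdec]) i (by omega) hi
            (fun t ht1 ht2 => absurd (le_trans ht1 ht2) (by omega))
          refine le_trans (min_le_min le_rfl ?_) hb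
          have : (r : Int) ≤ (i : Int) := by exact_mod_cast by omega
          linarith
      · -- (c): B's contribution of every unprocessed bar
        intro i0 h1 h2
        by_cases hi0 : i + 1 ≤ i0
        · exact ihc i0 hi0 h2
        · have hii : i0 = i := by omega
          subst hii
          have hiR : i0 ≤ altRight h (h.getD i0 0) i0 := altRight_ge h _ i0
          have hRlen : altRight h (h.getD i0 0) i0 < h.length := altRight_lt_len h _ i0 hi
          have hLle : altLeft h (h.getD i0 0) i0 ≤ i0 := altLeft_le h _ i0
          -- j: the rightmost bar of height h[i0] within [i0, R]
          obtain ⟨j, hij, hPj2, hjR, hgt⟩ :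
              ∃ j, i0 ≤ j ∧ h.getD j 0 = h.getD i0 0 ∧ j ≤ altRight h (h.getD i0 0) i0 ∧
                (∀ t, j < t → t ≤ altRight h (h.getD i0 0) i0 → h.getD i0 0 < h.getD t 0) := by
            have hPi : i0 ≤ i0 ∧ h.getD i0 0 = h.getD i0 0 := ⟨le_rfl, rfl⟩
            have hPj := Nat.findGreatest_spec
              (P := fun t => i0 ≤ t ∧ h.getD t 0 = h.getD i0 0) hiR hPi
            refine ⟨Nat.findGreatest (fun t => i0 ≤ t ∧ h.getD t 0 = h.getD i0 0)
              (altRight h (h.getD i0 0) i0), hPj.1, hPj.2, Nat.findGreatest_le _, ?_⟩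
            intro t ht1 ht2
            have hne := Nat.findGreatest_is_greatest ht1 ht2
            have hge : h.getD i0 0 ≤ h.getD t 0 := altRight_cover h _ i0 t (by omega) ht2
            rcases lt_or_eq_of_le hge with hlt | heq
            · exact hlt
            · exact absurd ⟨le_trans hPj.1 (le_of_lt ht1), heq.symm⟩ hne
          by_cases hji : j = i0
          · -- i0 itself is the rightmost bar of its height in its span: use (b) with r = R
            have hb := ihb [] i0 stack rfl (altRight h (h.getD i0 0) i0) (by omega) hRlen
              (fun t ht1 ht2 => hgt t (by omega) ht2)
            refine le_trans ?_ hb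
            have hsL : headI stack ≤ (altLeft h (h.getD i0 0) i0 : Int) - 1 := by
              cases stack with
              | nil =>
                simp only [headI]
                have : (0 : Int) ≤ (altLeft h (h.getD i0 0) i0 : Int) := Int.natCast_nonneg _
                linarith
              | cons s rest =>
                have hs_lt : h.getD s 0 < h.getD i0 0 := by
                  rcases hc' with hc' | hc'
                  · simp at hc'
                  · simpa using hc'
                have hsi : s < i0 := inv.2.1 s List.mem_cons_self
                have : s < altLeft h (h.getD i0 0) i0 := by
                  by_contra hsl
                  exact absurd (altLeft_cover h _ i0 s (by omega) hsi) (not_le.2 hs_lt)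
                simp only [headI]
                have : (s : Int) + 1 ≤ (altLeft h (h.getD i0 0) i0 : Int) := by exact_mod_cast this
                linarith
            unfold termOf
            refine min_le_min le_rfl ?_
            linarith
          · -- the rightmost bar j of this height, processed later, dominates i0's contribution
            have hjlen : j < h.length := lt_of_le_of_lt hjR hRlen
            refine le_trans ?_ (ihc j (by omega) hjlen)
            unfold termOf
            rw [hPj2]
            refine min_le_min le_rfl ?_
            have hLj : altLeft h (h.getD i0 0) j ≤ altLeft h (h.getD i0 0) i0 := by
              apply altLeft_min
              intro t ht1 ht2
              by_cases hti : t < i0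
              · exact altLeft_cover h _ i0 t ht1 hti
              · by_cases hti' : t = i0
                · rw [hti']
                · exact altRight_cover h _ i0 t (by omega) (by omega)
            have hRj : altRight h (h.getD i0 0) i0 ≤ altRight h (h.getD i0 0) j := by
              apply altRight_max h _ j _ hRlen
              intro t ht1 ht2
              exact altRight_cover h _ i0 t (by omega) ht2
            have c1 : ((altLeft h (h.getD i0 0) j : Nat) : Int) ≤ altLeft h (h.getD i0 0) i0 := by
              exact_mod_cast hLj
            have c2 : ((altRight h (h.getD i0 0) i0 : Nat) : Int) ≤ altRight h (h.getD i0 0) j := by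
              exact_mod_cast hRj
            linarith
  | case2 a b c d => simp at d
  | case3 res i hle T rest hcond ih =>
    intro inv
    simp only [width_eq] at ih ⊢
    have hpop : i = h.length ∨ h.getD i 0 ≤ h.getD T 0 := by
      rcases not_or.1 hcond with ⟨h1, h2⟩
      rcases Decidable.not_and_iff_not_or_not.1 h2 with h2 | h2
      · left; omega
      · right; simpa using not_lt.1 h2
    have hTi : T < i := inv.2.1 T List.mem_cons_self
    obtain ⟨iha, ihb, ihc⟩ := ih (inv_pop h T rest i inv hpop)
    refine ⟨le_trans (le_max_left _ _) iha, ?_, ihc⟩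
    intro pre j rest2 hdec r h1 h2 h3
    cases pre with
    | nil =>
      simp only [List.nil_append, List.cons.injEq] at hdec
      obtain ⟨rfl, rfl⟩ := hdec
      have hr : r + 1 = i := by
        by_contra hri
        have hir : i ≤ r := by omega
        have := h3 i le_rfl hir
        rcases hpop with hp | hp
        · omega
        · exact absurd this (not_lt.2 hp)
      have hri : (r : Int) = (i : Int) - 1 := by omega
      rw [hri]
      exact le_trans (le_max_right _ _) iha
    | cons T' pre' =>
      simp only [List.cons_append, List.cons.injEq] at hdec
      exact ihb pre' j rest2 hdec.2 r h1 h2 h3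
  | case4 res stack i hle =>
    intro inv
    exact absurd inv.1 hle

-- Upper bound: every value A ever records is one of B's contributions, clipped.
theorem ub (h : List Int) (X res : Int) (stack : List Nat) (i : Nat)
    (hX : ∀ i0 : Nat, i0 < h.length → termOf h i0 ≤ X) :
    StInv h stack i → res ≤ X → findLoop h res stack i ≤ X := by
  fun_induction findLoop with
  | case1 res stack i hle hc ih =>
    intro inv hres
    by_cases hi : i < h.length
    case neg =>
      have hstack : stack = [] := by
        rcases hc with hc | hc
        · exact hc
        · omega
      subst hstack
      rw [findLoop]
      simpa [show ¬ (i + 1 ≤ h.length) from by omega] using hres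
    case pos =>
      have hc' : stack = [] ∨ h.getD (stack.headD 0) 0 < h.getD i 0 := by
        rcases hc with hc | hc
        · exact Or.inl hc
        · exact Or.inr hc.2
      exact ih (inv_push h stack i inv hi hc') hres
  | case2 a b c d => simp at d
  | case3 res i hle T rest hcond ih =>
    intro inv hres
    simp only [width_eq] at ih ⊢
    have hpop : i = h.length ∨ h.getD i 0 ≤ h.getD T 0 := by
      rcases not_or.1 hcond with ⟨h1, h2⟩
      rcases Decidable.not_and_iff_not_or_not.1 h2 with h2 | h2
      · left; omega
      · right; simpa using not_lt.1 h2
    have hTi : T < i := inv.2.1 T List.mem_cons_self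
    have hTlen : T < h.length := by
      have := inv.1; omega
    have hbet := inv.2.2.1
    have h5 := inv.2.2.2.2
    -- the recorded value is at most B's contribution for bar T
    have hval : min (h.getD T 0) ((i : Int) - 1 - headI rest) ≤ termOf h T := by
      have haN : ∀ t : Nat, leftEnd rest ≤ t ↔ headI rest < (t : Int) := by
        intro t
        cases rest with
        | nil => simp only [headI, leftEnd]; omega
        | cons p rposs => simp only [headI, leftEnd]; omega
      have hLa : altLeft h (h.getD T 0) T ≤ leftEnd rest := by
        apply altLeft_min
        intro t ht1 ht2
        exact between_head h T rest hbet t ((haN t).1 ht1) ht2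
      have hRb : i - 1 ≤ altRight h (h.getD T 0) T := by
        apply altRight_max h _ T (i - 1) (by omega)
        intro t ht1 ht2
        exact le_of_lt (h5 T t rfl ht1 (by omega))
      have hI : (headI rest : Int) = ((leftEnd rest : Nat) : Int) - 1 := by
        cases rest with
        | nil => simp [headI, leftEnd]
        | cons p rposs => simp [headI, leftEnd]
      have c1 : ((altLeft h (h.getD T 0) T : Nat) : Int) ≤ ((leftEnd rest : Nat) : Int) := by
        exact_mod_cast hLa
      have c2 : (i : Int) - 1 ≤ ((altRight h (h.getD T 0) T : Nat) : Int) := by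
        have : ((i - 1 : Nat) : Int) ≤ ((altRight h (h.getD T 0) T : Nat) : Int) := by
          exact_mod_cast hRb
        omega
      unfold termOf
      refine min_le_min le_rfl ?_
      rw [hI]
      linarith
    have hres' : max res (min (h.getD T 0) ((i : Int) - 1 - headI rest)) ≤ X :=
      max_le hres (le_trans hval (hX T hTlen))
    exact ih (inv_pop h T rest i inv hpop) hres'
  | case4 res stack i hle =>
    intro inv hres
    exact hres

theorem inv_init (h : List Int) : StInv h [] 0 := by
  refine ⟨Nat.zero_le _, by simp, trivial, ?_, ?_⟩
  · intro t _ h2; omega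
  · intro s t hs _ _; simp at hs

theorem find_alt_eq_foldl (h : List Int) :
    find_alt h = (List.range h.length).foldl (fun r i => max r (termOf h i)) 0 := rfl

theorem find_eq (h : List Int) : find h = find_alt h := by
  obtain ⟨ha, _, hc⟩ := grand h 0 [] 0 (inv_init h)
  apply le_antisymm
  · refine ub h (find_alt h) 0 [] 0 ?_ (inv_init h) ?_
    · intro i0 hi0
      rw [find_alt_eq_foldl]
      exact le_foldl_max_mem (termOf h) (List.range h.length) 0 i0 (List.mem_range.2 hi0)
    · rw [find_alt_eq_foldl]
      exact le_foldl_max_init _ _ _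
  · rw [find_alt_eq_foldl]
    refine foldl_max_le _ _ _ _ ha ?_
    intro x hx
    exact hc x (Nat.zero_le _) (List.mem_range.1 hx)

-- ===== VERDICT (by name: the statement is the Claim_ definition above) =====
theorem find_spec : Claim_equal_find := by
  intro h_ _
  unfold Spec_find
  exact find_eq h_
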